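-- pv_equiv track=rewrite | github.com/LauraTabaksblat/ionospheric_scintillation | RINEX-reader.py | dur_per_freq
-- ===== SOURCE A (Python) =====
-- def dur_per_freq(dur_lst):
--     L1_lst = []
--     L2_lst = []
--     for i in dur_lst:
--         if i[0] == 1:
--             L1_lst.append(i[1])
--         elif i[0] == 2:
--             L2_lst.append(i[1])
--         else:
--             L1_lst.append(i[1])
--             L2_lst.append(i[1])
--     return(L1_lst,L2_lst)
-- ===== SOURCE B (Python) =====
-- def dur_per_freq(dur_lst):
--     return ([i[1] for i in dur_lst if i[0] != 2],
--             [i[1] for i in dur_lst if i[0] != 1])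
-- ===== Notes on version B (the rewrite author's own statement) =====
-- stated objective: simpler
-- what changed: Replaces the single three-branch classification loop with an accumulator pair by two independent filtered comprehensions (!=2 for L1, !=1 for L2) over the input.
import Mathlib
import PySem

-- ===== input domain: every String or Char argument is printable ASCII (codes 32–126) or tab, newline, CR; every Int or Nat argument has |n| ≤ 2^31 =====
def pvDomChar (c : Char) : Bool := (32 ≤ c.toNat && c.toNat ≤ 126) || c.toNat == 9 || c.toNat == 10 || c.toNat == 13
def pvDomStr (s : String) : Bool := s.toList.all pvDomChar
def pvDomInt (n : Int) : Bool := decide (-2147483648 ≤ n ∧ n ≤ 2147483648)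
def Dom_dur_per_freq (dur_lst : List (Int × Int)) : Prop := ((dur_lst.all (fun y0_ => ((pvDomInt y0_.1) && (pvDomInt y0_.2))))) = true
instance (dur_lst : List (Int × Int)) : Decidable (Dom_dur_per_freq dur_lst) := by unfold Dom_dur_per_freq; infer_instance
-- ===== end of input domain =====

-- B replaces A's single three-branch loop with two independent filtered passes; return value only, no mutation observable.

-- ===== PORT A =====
-- the loop: one pass accumulating the pair (L1_lst, L2_lst), branches in source order
def dur_per_freq (dur_lst : List (Int × Int)) : List Int × List Int :=
  dur_lst.foldl
    (fun (acc : List Int × List Int) i =>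
      if i.1 = 1 then (acc.1 ++ [i.2], acc.2)
      else if i.1 = 2 then (acc.1, acc.2 ++ [i.2])
      else (acc.1 ++ [i.2], acc.2 ++ [i.2]))
    ([], [])

-- ===== PORT B =====
def dur_per_freq_alt (dur_lst : List (Int × Int)) : List Int × List Int :=
  ((dur_lst.filter (fun i => i.1 ≠ 2)).map (fun i => i.2),
   (dur_lst.filter (fun i => i.1 ≠ 1)).map (fun i => i.2))

-- ===== PRECONDITION & SPEC =====
def Spec_dur_per_freq (dur_lst : List (Int × Int)) (out : List Int × List Int) : Prop := out = dur_per_freq_alt dur_lst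
instance (dur_lst : List (Int × Int)) (out : List Int × List Int) : Decidable (Spec_dur_per_freq dur_lst out) := by unfold Spec_dur_per_freq; infer_instance

-- ===== CLAIM (what is proved, stated in full; the proofs are below) =====
def Claim_equal_dur_per_freq : Prop := ∀ (dur_lst : List (Int × Int)), Dom_dur_per_freq dur_lst → Spec_dur_per_freq dur_lst (dur_per_freq dur_lst)

-- ===== LEMMAS AND PROOFS =====
-- loop invariant: folding from state (a, b) appends B's filtered/mapped lists
lemma dur_per_freq_fold (dur_lst : List (Int × Int)) (a b : List Int) :
    dur_lst.foldl
      (fun (acc : List Int × List Int) i =>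
        if i.1 = 1 then (acc.1 ++ [i.2], acc.2)
        else if i.1 = 2 then (acc.1, acc.2 ++ [i.2])
        else (acc.1 ++ [i.2], acc.2 ++ [i.2]))
      (a, b)
    = (a ++ (dur_lst.filter (fun i => i.1 ≠ 2)).map (fun i => i.2),
       b ++ (dur_lst.filter (fun i => i.1 ≠ 1)).map (fun i => i.2)) := by
  induction dur_lst generalizing a b with
  | nil => simp
  | cons x xs ih =>
    by_cases h1 : x.1 = 1 <;> by_cases h2 : x.1 = 2 <;>
      simp [List.foldl, h1, h2, ih, List.filter]

-- ===== VERDICT (by name: the statement is the Claim_ definition above) =====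
theorem dur_per_freq_spec : Claim_equal_dur_per_freq := by
  intro dur_lst _
  unfold Spec_dur_per_freq dur_per_freq dur_per_freq_alt
  simpa using dur_per_freq_fold dur_lst [] []
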